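-- pv_equiv track=rewrite | github.com/Martdiaz/NoiseCanceller-Python-Project | LMS.py | convm
-- ===== SOURCE A (Python) =====
-- def convm(x, order):
-- 	w = order
-- 	h = len(x)
-- 	matrix = [[0 for x in range(w)] for y in range(h)]
-- 	for n in range (0, len(x)):
-- 		for k in range (0, order):
-- 			matrix[n][k] = x[n-k]
-- 			if ((n - k) < 0):
-- 				matrix[n][k] = 0
-- 	return matrix
-- ===== SOURCE B (Python) =====
-- def convm(x, order):
--     if order <= 0:
--         return [[] for _ in x]
--     p = [0] * (order - 1) + x
--     return [p[n:n + order][::-1] for n in range(len(x))]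
-- ===== Notes on version B (the rewrite author's own statement) =====
-- stated objective: idiomatic
-- what changed: Replaces the zero-matrix-then-mutate nested loops (with a negative-index-overwrite guard) by front-padding the signal with order-1 zeros and taking each row as a reversed slice of the padded list.
import Mathlib
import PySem

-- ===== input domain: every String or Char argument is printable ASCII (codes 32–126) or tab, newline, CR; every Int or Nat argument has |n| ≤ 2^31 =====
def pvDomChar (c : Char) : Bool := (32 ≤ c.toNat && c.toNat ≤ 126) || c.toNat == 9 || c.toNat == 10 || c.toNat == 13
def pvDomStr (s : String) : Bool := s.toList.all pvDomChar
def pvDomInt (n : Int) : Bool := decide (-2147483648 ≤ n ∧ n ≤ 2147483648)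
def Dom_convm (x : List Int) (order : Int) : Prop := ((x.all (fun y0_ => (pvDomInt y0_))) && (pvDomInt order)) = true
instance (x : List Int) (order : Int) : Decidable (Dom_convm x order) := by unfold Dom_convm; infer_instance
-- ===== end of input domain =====

-- B replaces A's zero-matrix-plus-nested-mutation by zero-padding the signal and
-- taking each row as a reversed slice (objective: idiomatic).

-- ===== PORT A =====
-- literal transliteration of A: build an h×w zero matrix, then for n,k set
-- matrix[n][k] = x[n-k] and overwrite with 0 when n-k < 0.
-- x[n-k] uses '(pyGet? …).getD 0': 'none' is Python's IndexError, excluded by Pre_convm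
-- (the fetched value is overwritten by 0 in exactly the cases Python would wrap or raise).
def convm (x : List Int) (order : Int) : List (List Int) :=
  let w := order
  let h := x.length
  let matrix := (PySem.List.pyRange 0 (h : Int) 1).map
    (fun _ => (PySem.List.pyRange 0 w 1).map (fun _ => (0 : Int)))
  (PySem.List.pyRange 0 (x.length : Int) 1).foldl (fun m n =>
    m.set n.toNat
      ((PySem.List.pyRange 0 order 1).foldl (fun row k =>
        let row := row.set k.toNat ((PySem.List.pyGet? x (n - k)).getD 0)
        if n - k < 0 then row.set k.toNat 0 else row)
      (m.getD n.toNat []))) matrix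

-- ===== PORT B =====
-- literal transliteration of B: pad with order-1 zeros in front, each row is a
-- reversed slice p[n:n+order]  ('[::-1]' = slice? with step -1, never none).
def convm_alt (x : List Int) (order : Int) : List (List Int) :=
  if order ≤ 0 then x.map (fun _ => [])
  else
    let p := List.replicate (order - 1).toNat (0 : Int) ++ x
    (PySem.List.pyRange 0 (x.length : Int) 1).map (fun n =>
      (PySem.List.slice? (PySem.List.slice p (some n) (some (n + order))) none none (-1)).getD [])

-- ===== PRECONDITION & SPEC =====
-- Pre_ excludes the inputs where Python A raises IndexError: x nonempty with
-- order > len(x)+1 (then x[n-k] reaches below -len(x)).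
def Pre_convm (x : List Int) (order : Int) : Prop := x = [] ∨ order ≤ (x.length : Int) + 1
instance (x : List Int) (order : Int) : Decidable (Pre_convm x order) := by unfold Pre_convm; infer_instance
def pvWitness_convm : List Int × Int := ([1, 2, 3], 2)

def Spec_convm (x : List Int) (order : Int) (out : List (List Int)) : Prop := out = convm_alt x order
instance (x : List Int) (order : Int) (out : List (List Int)) : Decidable (Spec_convm x order out) := by unfold Spec_convm; infer_instance

-- ===== CLAIM (what is proved, stated in full; the proofs are below) =====
def Claim_equal_convm : Prop := ∀ (x : List Int) (order : Int), Dom_convm x order → Pre_convm x order → Spec_convm x order (convm x order)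

-- ===== LEMMAS AND PROOFS =====

-- the common value of entry (n,k) of both matrices
def pvVal (x : List Int) (n k : Nat) : Int :=
  if (n : Int) - (k : Int) < 0 then 0 else ((PySem.List.pyGet? x ((n : Int) - (k : Int))).getD 0)

-- generic: folding "set index k to g k (current value at k)" over range m rewrites
-- the first m entries of the list in place.
theorem pv_foldl_set_range {α : Type} (f : List α → Nat → List α) (g : Nat → α → α) (d : α)
    (hf : ∀ (r : List α) (k : Nat), f r k = r.set k (g k (r.getD k d))) :
    ∀ (m : Nat) (r0 : List α), m ≤ r0.length →
      (List.range m).foldl f r0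
        = (List.range m).map (fun k => g k (r0.getD k d)) ++ r0.drop m := by
  intro m
  induction m with
  | zero => intro r0 _; simp
  | succ m ih =>
    intro r0 hm
    have hmlt : m < r0.length := by omega
    rw [List.range_succ, List.foldl_append, List.map_append, ih r0 (by omega)]
    simp only [List.foldl_cons, List.foldl_nil, List.map_cons, List.map_nil]
    have hlen : ((List.range m).map (fun k => g k (r0.getD k d))).length = m := by simp
    have hget : ((List.range m).map (fun k => g k (r0.getD k d)) ++ List.drop m r0).getD m d
        = r0.getD m d := by
      rw [List.getD_eq_getElem?_getD, List.getElem?_append_right (by simp),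
          List.getD_eq_getElem?_getD]
      simp [List.getElem?_drop]
    rw [hf, hget, List.set_append, hlen, if_neg (lt_irrefl m), Nat.sub_self,
        List.drop_eq_getElem_cons hmlt, List.set_cons_zero]
    simp [List.append_assoc]

-- A's port: row n, column k holds pvVal x n k.
theorem convm_eq (x : List Int) (order : Int) :
    convm x order
      = (List.range x.length).map (fun n => (List.range order.toNat).map (fun k => pvVal x n k)) := by
  have hf2 : ∀ (nn : Nat) (r : List Int) (k : Nat),
      (if (nn : Int) - (k : Int) < 0 then
          (r.set k ((PySem.List.pyGet? x ((nn : Int) - (k : Int))).getD 0)).set k 0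
        else r.set k ((PySem.List.pyGet? x ((nn : Int) - (k : Int))).getD 0))
        = r.set k (pvVal x nn k) := by
    intro nn r k
    simp only [pvVal]
    split_ifs with h
    · exact List.set_set _
    · rfl
  simp only [convm, PySem.List.pyRange_one, Int.sub_zero, Int.toNat_natCast, List.foldl_map,
    zero_add, List.map_const', List.length_map, List.length_range]
  have e := pv_foldl_set_range
    (fun (m : List (List Int)) (n : Nat) => m.set n
      (List.foldl (fun (r : List Int) (k : Nat) =>
          if (n : Int) - (k : Int) < 0 then
            (r.set k ((PySem.List.pyGet? x ((n : Int) - (k : Int))).getD 0)).set k 0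
          else r.set k ((PySem.List.pyGet? x ((n : Int) - (k : Int))).getD 0))
        (m.getD n []) (List.range order.toNat)))
    (fun (n : Nat) (old : List Int) =>
      List.foldl (fun (r : List Int) (k : Nat) =>
          if (n : Int) - (k : Int) < 0 then
            (r.set k ((PySem.List.pyGet? x ((n : Int) - (k : Int))).getD 0)).set k 0
          else r.set k ((PySem.List.pyGet? x ((n : Int) - (k : Int))).getD 0))
        old (List.range order.toNat))
    ([] : List Int) (fun r k => rfl) x.length
    (List.replicate x.length (List.replicate order.toNat (0 : Int))) (by simp)
  refine Eq.trans e ?_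
  have hdrop : (List.replicate x.length (List.replicate order.toNat (0 : Int))).drop x.length
      = [] := by simp
  rw [hdrop, List.append_nil]
  apply List.map_congr_left
  intro nn hnn
  rw [List.mem_range] at hnn
  simp only [List.getD_replicate _ hnn]
  have e2 := pv_foldl_set_range
    (fun (r : List Int) (k : Nat) =>
      if (nn : Int) - (k : Int) < 0 then
        (r.set k ((PySem.List.pyGet? x ((nn : Int) - (k : Int))).getD 0)).set k 0
      else r.set k ((PySem.List.pyGet? x ((nn : Int) - (k : Int))).getD 0))
    (fun (k : Nat) (_ : Int) => pvVal x nn k) (0 : Int)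
    (fun r k => hf2 nn r k) order.toNat (List.replicate order.toNat (0 : Int)) (by simp)
  refine Eq.trans e2 ?_
  simp

-- B's port: the same matrix of pvVal entries.
theorem convm_alt_eq (x : List Int) (order : Int) :
    convm_alt x order
      = (List.range x.length).map (fun n => (List.range order.toNat).map (fun k => pvVal x n k)) := by
  unfold convm_alt
  by_cases hord : order ≤ 0
  · rw [if_pos hord]
    have h0 : order.toNat = 0 := by omega
    rw [h0]
    simp [List.map_const']
  · rw [if_neg hord]
    have hpos : (0 : Int) < order := by omega
    have hord1 : 1 ≤ order.toNat := by omega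
    rw [PySem.List.pyRange_one 0 (x.length : Int)]
    simp only [Int.sub_zero, Int.toNat_natCast, List.map_map, Function.comp_def, zero_add]
    apply List.map_congr_left
    intro nn hnn
    rw [List.mem_range] at hnn
    rw [PySem.List.slice?_none_none_neg_one, Option.getD_some]
    rw [show ((nn : Nat) : Int) + order = (((nn + order.toNat : Nat) : Nat) : Int) by
          push_cast
          omega]
    rw [PySem.List.slice_natCast, Nat.add_sub_cancel_left]
    have hplen : (List.replicate (order - 1).toNat (0 : Int) ++ x).length
        = (order.toNat - 1) + x.length := by
      simp only [List.length_append, List.length_replicate]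
      omega
    have hlen1 : (List.take order.toNat
        (List.drop nn (List.replicate (order - 1).toNat (0 : Int) ++ x))).length
        = order.toNat := by
      simp only [List.length_take, List.length_drop, hplen]
      omega
    apply List.ext_getElem
    · simp only [List.length_reverse, hlen1, List.length_map, List.length_range]
    · intro i h1 h2
      simp only [List.length_map, List.length_range] at h2
      rw [List.getElem_reverse, List.getElem_map, List.getElem_range]
      simp only [hlen1]
      rw [List.getElem_take, List.getElem_drop]
      by_cases hcase : nn < i
      · -- padding region: entry 0, and pvVal is 0 since n-k < 0
        rw [List.getElem_append_left (by simp only [List.length_replicate]; omega)]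
        rw [List.getElem_replicate]
        have hneg : (nn : Int) - (i : Int) < 0 := by omega
        simp [pvVal, hneg]
      · -- signal region: both sides are x[nn - i]
        rw [List.getElem_append_right (by simp only [List.length_replicate]; omega)]
        simp only [List.length_replicate]
        have hidx : nn + (order.toNat - 1 - i) - (order - 1).toNat = nn - i := by omega
        simp only [hidx]
        have hc : (nn : Int) - (i : Int) = ((nn - i : Nat) : Int) := by omega
        simp only [pvVal, hc, PySem.List.pyGet?_natCast]
        rw [List.getElem?_eq_getElem (by omega)]
        simp

-- ===== VERDICT (by name: the statement is the Claim_ definition above) =====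
theorem convm_spec : Claim_equal_convm := by
  intro x order _ _
  unfold Spec_convm
  rw [convm_eq, convm_alt_eq]
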